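-- pv_equiv track=rewrite | github.com/kaiyaok2/project_reduction | script.py | identify_third_party_dependencies
-- ===== SOURCE A (Python) =====
-- def identify_third_party_dependencies(call_graph, third_party_packages, class_package_map):
--     classes_to_remove = set()
--     dependent_class_methods = {}
--     to_examine = []
--     examined = set()
--
--     for caller_method, callee_method in call_graph:
--         caller_class = caller_method.split(":")[0]
--         callee_class = callee_method.split(":")[0]
--         if any(callee_class.startswith(pkg) for pkg in third_party_packages)\
--             and (("<init>" in caller_method) or ("<clinit>" in caller_method) or ("setUp" in caller_method) or ("tearDown" in caller_method)):
--             classes_to_remove.add(caller_class)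
--
--     for caller_method, callee_method in call_graph:
--         caller_class = caller_method.split(":")[0]
--         callee_class = callee_method.split(":")[0]
--         if any(callee_class.startswith(pkg) for pkg in third_party_packages)\
--             or (caller_class in classes_to_remove):
--             if caller_class in dependent_class_methods:
--                 dependent_class_methods[caller_class].add(caller_method)
--             else:
--                 methods = set()
--                 methods.add(caller_method)
--                 dependent_class_methods[caller_class] = methods
--             to_examine.append(caller_method)
--
--
--     while to_examine:
--         method = to_examine.pop(0)
--         examined.add(method)
--
--         for caller_method, callee_method in call_graph:
--             caller_class = caller_method.split(":")[0]
--             if (callee_method == method)\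
--                 and (("<init>" in caller_method) or ("<clinit>" in caller_method) or ("setUp" in caller_method) or ("tearDown" in caller_method)):
--                 classes_to_remove.add(caller_class)
--
--         for caller_method, callee_method in call_graph:
--             callee_class = callee_method.split(":")[0]
--             caller_class = caller_method.split(":")[0]
--             if (callee_method == method) or (caller_class in classes_to_remove):
--                 if caller_class in dependent_class_methods:
--                     dependent_class_methods[caller_class].add(caller_method)
--                 else:
--                     methods = set()
--                     methods.add(caller_method)
--                     dependent_class_methods[caller_class] = methods
--                 if (not caller_method in examined) and (not caller_method in to_examine):
--                     to_examine.append(caller_method)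
--
--
--
--     for dependent_class in dependent_class_methods:
--         for method in dependent_class_methods[dependent_class]:
--             if (("<init>" in method) or ("<clinit>" in method) or ("setUp" in method) or ("tearDown" in method)):
--                 classes_to_remove.add(caller_class)
--     return classes_to_remove, dependent_class_methods
-- ===== SOURCE B (Python) =====
-- # Worklist taint propagation over per-edge annotations precomputed once, with a
-- # callee-indexed adjacency map for the constructor-marking pass; drops the
-- # original's final loop, which (due to a stale loop variable) only adds the last
-- # edge's caller class.
-- from collections import deque
--
--
-- def identify_third_party_dependencies(call_graph, third_party_packages, class_package_map):
--     def cls(method):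
--         return method.split(":")[0]
--
--     def lifecycle(method):
--         return ("<init>" in method or "<clinit>" in method
--                 or "setUp" in method or "tearDown" in method)
--
--     # one preprocessing pass: annotate every edge, and index the classes of
--     # lifecycle callers by their callee method
--     edges = []
--     lifecycle_callers_of = {}
--     for caller, callee in call_graph:
--         c = cls(caller)
--         life = lifecycle(caller)
--         third = any(cls(callee).startswith(pkg) for pkg in third_party_packages)
--         edges.append((caller, callee, c, life, third))
--         if life:
--             lifecycle_callers_of.setdefault(callee, []).append(c)
--
--     classes_to_remove = set()
--     for _, _, c, life, third in edges:
--         if third and life: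
--             classes_to_remove.add(c)
--
--     dependent_class_methods = {}
--     to_examine = deque()
--     for caller, _, c, _, third in edges:
--         if third or c in classes_to_remove:
--             dependent_class_methods.setdefault(c, set()).add(caller)
--             to_examine.append(caller)
--
--     examined = set()
--     while to_examine:
--         method = to_examine.popleft()
--         examined.add(method)
--         for c in lifecycle_callers_of.get(method, []):
--             classes_to_remove.add(c)
--         for caller, callee, c, _, _ in edges:
--             if callee == method or c in classes_to_remove:
--                 dependent_class_methods.setdefault(c, set()).add(caller)
--                 if caller not in examined and caller not in to_examine:
--                     to_examine.append(caller)
--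
--     return classes_to_remove, dependent_class_methods
-- ===== Notes on version B (the rewrite author's own statement) =====
-- stated objective: alternative
-- what changed: B precomputes per-edge annotations (caller class, lifecycle flag, third-party flag) and a callee-indexed map of lifecycle callers in one preprocessing pass, so the worklist loop uses the annotations and an indexed lookup for the constructor-marking pass instead of re-splitting strings, re-testing package prefixes and rescanning the graph; B also drops A's final loop, which only adds a stale variable's value.
-- intended difference: On graphs that have a third-party-calling edge and a lifecycle caller wired to a third-party or in-graph callee, and whose last edge's caller class is not itself a direct seed, A's final loop adds the class of the LAST edge's caller (a stale loop variable; the intended 'dependent_class' addition is always already present) to classes_to_remove, while B returns the taint closure without that spurious class, which is the intended result. — e.g. on identify_third_party_dependencies([("A:<init>", "lib:f"), ("B:g", "C:h")], ["lib"], []): A returns (["A", "B"], [("A", ["A:<init>"])]), B returns (["A"], [("A", ["A:<init>"])])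
import Mathlib
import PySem

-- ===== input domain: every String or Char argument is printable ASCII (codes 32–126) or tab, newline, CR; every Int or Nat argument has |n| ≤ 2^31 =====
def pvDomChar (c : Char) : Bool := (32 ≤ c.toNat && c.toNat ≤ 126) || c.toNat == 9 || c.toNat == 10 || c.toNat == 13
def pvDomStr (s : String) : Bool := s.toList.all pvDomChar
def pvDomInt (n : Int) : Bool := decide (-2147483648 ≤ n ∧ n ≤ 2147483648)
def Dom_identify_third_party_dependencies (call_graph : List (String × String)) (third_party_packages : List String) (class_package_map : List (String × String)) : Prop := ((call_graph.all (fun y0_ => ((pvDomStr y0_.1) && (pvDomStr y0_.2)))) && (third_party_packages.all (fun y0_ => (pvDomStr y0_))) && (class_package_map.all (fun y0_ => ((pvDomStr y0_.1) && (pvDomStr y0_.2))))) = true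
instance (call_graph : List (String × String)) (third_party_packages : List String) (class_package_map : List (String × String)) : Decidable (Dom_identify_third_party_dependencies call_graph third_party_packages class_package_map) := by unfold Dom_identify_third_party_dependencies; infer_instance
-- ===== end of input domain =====

-- B runs the worklist over per-edge annotations precomputed once, with a
-- callee-indexed map of lifecycle callers for the marking pass, and drops A's
-- final stale-variable loop; equivalence is proved outside D_ below.

-- shared tiny helpers (the Python expressions m.split(":")[0], the lifecycle test,
-- and the third-party-prefix test; used by both ports and by D_)
def pvCls (m : String) : String := ((PySem.Str.split? m ":").getD []).headD ""
def pvLife (m : String) : Bool :=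
  PySem.Str.isIn "<init>" m || PySem.Str.isIn "<clinit>" m ||
  PySem.Str.isIn "setUp" m || PySem.Str.isIn "tearDown" m
def pvTP (pkgs : List String) (calleeClass : String) : Bool :=
  pkgs.any (fun p => PySem.Str.startswith calleeClass p)
-- the leftover value of the Python variable caller_class after the loops: the last edge's caller class
def pvLastCls (call_graph : List (String × String)) : String :=
  pvCls ((call_graph.getLast?.map Prod.fst).getD "")

-- ===== PORT A =====
-- dependent_class_methods[caller_class].add(caller_method), with A's explicit contains test
def pvA_addMethod (d : PySem.Dict String (PySem.Set String)) (c u : String) :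
    PySem.Dict String (PySem.Set String) :=
  if d.contains c then d.modify c PySem.Set.empty (fun s => PySem.Set.add s u)
  else d.insert c (PySem.Set.add PySem.Set.empty u)

-- first for-loop: seed classes_to_remove
def pvA_seedR (cg : List (String × String)) (pkgs : List String) : PySem.Set String :=
  cg.foldl (fun R e => if pvTP pkgs (pvCls e.2) && pvLife e.1 then PySem.Set.add R (pvCls e.1) else R)
    PySem.Set.empty

-- second for-loop: seed dependent_class_methods and to_examine
def pvA_seedDQ (cg : List (String × String)) (pkgs : List String) (R : PySem.Set String) :
    PySem.Dict String (PySem.Set String) × List String :=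
  cg.foldl (fun s e =>
      if pvTP pkgs (pvCls e.2) || PySem.Set.contains R (pvCls e.1) then
        (pvA_addMethod s.1 (pvCls e.1) e.1, s.2 ++ [e.1])
      else s)
    (PySem.Dict.mk [], [])

-- inner loop 1 of the while: mark classes of lifecycle callers of `method`
def pvA_markR (cg : List (String × String)) (m : String) (R : PySem.Set String) : PySem.Set String :=
  cg.foldl (fun R e => if e.2 == m && pvLife e.1 then PySem.Set.add R (pvCls e.1) else R) R

-- inner loop 2 of the while: taint callers, enqueue fresh ones
def pvA_propagate (cg : List (String × String)) (m : String) (R ex : PySem.Set String)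
    (d : PySem.Dict String (PySem.Set String)) (q : List String) :
    PySem.Dict String (PySem.Set String) × List String :=
  cg.foldl (fun s e =>
      if e.2 == m || PySem.Set.contains R (pvCls e.1) then
        (pvA_addMethod s.1 (pvCls e.1) e.1,
         if !(PySem.Set.contains ex e.1) && !(s.2.contains e.1) then s.2 ++ [e.1] else s.2)
      else s)
    (d, q)

-- the while-loop; fuel is only a totality guard (each iteration strictly shrinks
-- 2·|unseen possible methods| + |queue|, so the supplied fuel is never exhausted)
def pvA_loop (cg : List (String × String)) :
    Nat → PySem.Set String → PySem.Set String → PySem.Dict String (PySem.Set String) →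
    List String → PySem.Set String × PySem.Dict String (PySem.Set String)
  | 0, R, _, d, _ => (R, d)
  | _ + 1, R, _, d, [] => (R, d)
  | fuel + 1, R, ex, d, m :: rest =>
    let ex' := PySem.Set.add ex m
    let R' := pvA_markR cg m R
    let s := pvA_propagate cg m R' ex' d rest
    pvA_loop cg fuel R' ex' s.1 s.2

-- final for-loop: for every lifecycle method in the dict, add caller_class — the
-- STALE loop variable, i.e. the last edge's caller class
def pvA_final (lastCls : String) (d : PySem.Dict String (PySem.Set String))
    (R : PySem.Set String) : PySem.Set String :=
  d.items.foldl
    (fun R p => p.2.foldl (fun R mm => if pvLife mm then PySem.Set.add R lastCls else R) R) R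

def identify_third_party_dependencies (call_graph : List (String × String)) (third_party_packages : List String) (class_package_map : List (String × String)) : List String × (List (String × List String)) :=
  let R0 := pvA_seedR call_graph third_party_packages
  let s0 := pvA_seedDQ call_graph third_party_packages R0
  let fin := pvA_loop call_graph (2 * call_graph.length + s0.2.length + 1) R0 PySem.Set.empty s0.1 s0.2
  (pvA_final (pvLastCls call_graph) fin.2 fin.1, fin.2.items)

-- ===== PORT B =====
-- dependent_class_methods.setdefault(c, set()).add(u)
def pvB_addMethod (d : PySem.Dict String (PySem.Set String)) (c u : String) :
    PySem.Dict String (PySem.Set String) :=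
  (d.setdefault c PySem.Set.empty).modify c PySem.Set.empty (fun s => PySem.Set.add s u)

-- preprocessing pass: annotated edges (caller, callee, callerClass, lifecycle, thirdParty)
-- and lifecycle_callers_of: callee → classes of its lifecycle callers
def pvB_pre (cg : List (String × String)) (pkgs : List String) :
    List (String × String × String × Bool × Bool) × PySem.Dict String (List String) :=
  cg.foldl (fun s e =>
      let c := pvCls e.1
      let life := pvLife e.1
      let third := pvTP pkgs (pvCls e.2)
      (s.1 ++ [(e.1, e.2, c, life, third)],
       if life then (s.2.setdefault e.2 []).modify e.2 [] (fun l => l ++ [c]) else s.2))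
    ([], PySem.Dict.mk [])

def pvB_seedR (edges : List (String × String × String × Bool × Bool)) : PySem.Set String :=
  edges.foldl (fun R e => if e.2.2.2.2 && e.2.2.2.1 then PySem.Set.add R e.2.2.1 else R)
    PySem.Set.empty

def pvB_seedDQ (edges : List (String × String × String × Bool × Bool)) (R : PySem.Set String) :
    PySem.Dict String (PySem.Set String) × List String :=
  edges.foldl (fun s e =>
      if e.2.2.2.2 || PySem.Set.contains R e.2.2.1 then
        (pvB_addMethod s.1 e.2.2.1 e.1, s.2 ++ [e.1])
      else s)
    (PySem.Dict.mk [], [])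

-- the while-loop over annotated edges; marking pass via the precomputed index;
-- fuel is only a totality guard (the Python loop always terminates)
def pvB_loop (edges : List (String × String × String × Bool × Bool))
    (idx : PySem.Dict String (List String)) :
    Nat → PySem.Set String → PySem.Set String → PySem.Dict String (PySem.Set String) →
    List String → PySem.Set String × PySem.Dict String (PySem.Set String)
  | 0, R, _, d, _ => (R, d)
  | _ + 1, R, _, d, [] => (R, d)
  | fuel + 1, R, ex, d, m :: rest =>
    let ex' := PySem.Set.add ex m
    let R' := (idx.getD m []).foldl PySem.Set.add R
    let s := edges.foldl (fun s e =>
        if e.2.1 == m || PySem.Set.contains R' e.2.2.1 then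
          (pvB_addMethod s.1 e.2.2.1 e.1,
           if !(PySem.Set.contains ex' e.1) && !(s.2.contains e.1) then s.2 ++ [e.1] else s.2)
        else s)
      (d, rest)
    pvB_loop edges idx fuel R' ex' s.1 s.2

def identify_third_party_dependencies_alt (call_graph : List (String × String)) (third_party_packages : List String) (class_package_map : List (String × String)) : List String × (List (String × List String)) :=
  let pre := pvB_pre call_graph third_party_packages
  let R0 := pvB_seedR pre.1
  let s0 := pvB_seedDQ pre.1 R0
  let fin := pvB_loop pre.1 pre.2 (2 * pre.1.length + s0.2.length + 1) R0 PySem.Set.empty s0.1 s0.2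
  (fin.1, fin.2.items)

-- ===== PRECONDITION & SPEC =====
-- On graphs with a third-party-calling edge and a lifecycle caller wired to a third-party
-- or in-graph callee, whose last edge's caller class is not itself a direct seed, A's final
-- loop adds the LAST edge's caller class (a stale loop variable) to classes_to_remove;
-- B returns the taint closure without that spurious class, which is the intended result.
def D_identify_third_party_dependencies (call_graph : List (String × String)) (third_party_packages : List String) (class_package_map : List (String × String)) : Prop :=
  (call_graph.any (fun e => pvTP third_party_packages (pvCls e.2)) = true) ∧
  (call_graph.any (fun e => pvLife e.1 &&
      (pvTP third_party_packages (pvCls e.2) || (call_graph.map Prod.fst).contains e.2)) = true) ∧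
  (call_graph.all (fun e => !(pvLife e.1 && pvTP third_party_packages (pvCls e.2) &&
      (pvCls e.1 == pvLastCls call_graph))) = true)
instance (call_graph : List (String × String)) (third_party_packages : List String) (class_package_map : List (String × String)) : Decidable (D_identify_third_party_dependencies call_graph third_party_packages class_package_map) := by unfold D_identify_third_party_dependencies; infer_instance

def Spec_identify_third_party_dependencies (call_graph : List (String × String)) (third_party_packages : List String) (class_package_map : List (String × String)) (out : List String × (List (String × List String))) : Prop := ¬ D_identify_third_party_dependencies call_graph third_party_packages class_package_map → out = identify_third_party_dependencies_alt call_graph third_party_packages class_package_map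
instance (call_graph : List (String × String)) (third_party_packages : List String) (class_package_map : List (String × String)) (out : List String × (List (String × List String))) : Decidable (Spec_identify_third_party_dependencies call_graph third_party_packages class_package_map out) := by unfold Spec_identify_third_party_dependencies; infer_instance

def pvDiffWitness_identify_third_party_dependencies : (List (String × String)) × List String × (List (String × String)) :=
  ([("A:<init>", "lib:f"), ("B:g", "C:h")], ["lib"], [])
def pvDiffWitnessOut_identify_third_party_dependencies : (List String × (List (String × List String))) × (List String × (List (String × List String))) :=
  ((["A", "B"], [("A", ["A:<init>"])]), (["A"], [("A", ["A:<init>"])]))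

-- ===== CLAIM (what is proved, stated in full; the proofs are below) =====
def Claim_unchanged_identify_third_party_dependencies : Prop := ∀ (call_graph : List (String × String)) (third_party_packages : List String) (class_package_map : List (String × String)), Dom_identify_third_party_dependencies call_graph third_party_packages class_package_map → Spec_identify_third_party_dependencies call_graph third_party_packages class_package_map (identify_third_party_dependencies call_graph third_party_packages class_package_map)
def Claim_changed_identify_third_party_dependencies : Prop := Dom_identify_third_party_dependencies (pvDiffWitness_identify_third_party_dependencies.1) (pvDiffWitness_identify_third_party_dependencies.2.1) (pvDiffWitness_identify_third_party_dependencies.2.2) ∧ D_identify_third_party_dependencies (pvDiffWitness_identify_third_party_dependencies.1) (pvDiffWitness_identify_third_party_dependencies.2.1) (pvDiffWitness_identify_third_party_dependencies.2.2) ∧ identify_third_party_dependencies (pvDiffWitness_identify_third_party_dependencies.1) (pvDiffWitness_identify_third_party_dependencies.2.1) (pvDiffWitness_identify_third_party_dependencies.2.2) = pvDiffWitnessOut_identify_third_party_dependencies.1 ∧ identify_third_party_dependencies_alt (pvDiffWitness_identify_third_party_dependencies.1) (pvDiffWitness_identify_third_party_dependencies.2.1) (pvDiffWitness_identify_third_party_dependencies.2.2)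 = pvDiffWitnessOut_identify_third_party_dependencies.2 ∧ pvDiffWitnessOut_identify_third_party_dependencies.1 ≠ pvDiffWitnessOut_identify_third_party_dependencies.2

-- ===== LEMMAS AND PROOFS =====

-- ---- Dict/Set groundwork ----

theorem pv_insert_insert {κ ν : Type} [BEq κ] [LawfulBEq κ] (d : PySem.Dict κ ν) (k : κ) (v w : ν) :
    (d.insert k v).insert k w = d.insert k w := by
  cases h : d.contains k with
  | false =>
    have hall : ∀ p ∈ d.items, (p.1 == k) = false := by
      intro p hp
      cases hpk : (p.1 == k) with
      | false => rfl
      | true =>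
        exfalso
        have hc : d.contains k = true := List.any_eq_true.2 ⟨p, hp, hpk⟩
        rw [h] at hc
        cases hc
    have e1 : d.insert k v = PySem.Dict.mk (d.items ++ [(k, v)]) := by
      unfold PySem.Dict.insert; rw [h]; simp
    have e2 : d.insert k w = PySem.Dict.mk (d.items ++ [(k, w)]) := by
      unfold PySem.Dict.insert; rw [h]; simp
    have hc2 : (PySem.Dict.mk (d.items ++ [(k, v)]) : PySem.Dict κ ν).contains k = true := by
      simp [PySem.Dict.contains]
    rw [e1, e2]
    unfold PySem.Dict.insert
    rw [if_pos hc2]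
    congr 1
    show List.map (fun p => if (p.1 == k) = true then (k, w) else p) (d.items ++ [(k, v)]) =
      d.items ++ [(k, w)]
    rw [List.map_append]
    congr 1
    · rw [List.map_congr_left (g := id), List.map_id]
      intro p hp; simp [hall p hp]
    · simp
  | true =>
    have hx : ∃ p ∈ d.items, (p.1 == k) = true := by
      simpa [PySem.Dict.contains, List.any_eq_true] using h
    have e1 : d.insert k v =
        PySem.Dict.mk (List.map (fun p => if (p.1 == k) = true then (k, v) else p) d.items) := by
      unfold PySem.Dict.insert; rw [h]; simp
    have e2 : d.insert k w =
        PySem.Dict.mk (List.map (fun p => if (p.1 == k) = true then (k, w) else p) d.items) := by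
      unfold PySem.Dict.insert; rw [h]; simp
    have hc2 : (PySem.Dict.mk (List.map (fun p => if (p.1 == k) = true then (k, v) else p) d.items) :
        PySem.Dict κ ν).contains k = true := by
      rcases hx with ⟨p, hp, hpk⟩
      refine (List.any_eq_true).2 ⟨(k, v), List.mem_map.2 ⟨p, hp, by simp [hpk]⟩, by simp⟩
    rw [e1, e2]
    unfold PySem.Dict.insert
    rw [if_pos hc2]
    congr 1
    rw [List.map_map]
    apply List.map_congr_left
    intro p hp
    by_cases hpk : (p.1 == k) = true <;> simp [hpk]

theorem pv_addMethod_eq (d : PySem.Dict String (PySem.Set String)) (c u : String) :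
    pvA_addMethod d c u = pvB_addMethod d c u := by
  unfold pvA_addMethod pvB_addMethod
  cases h : d.contains c with
  | true => rw [PySem.Dict.setdefault_of_contains d _ h]; simp [h]
  | false =>
    rw [PySem.Dict.setdefault_of_not_contains d _ h]
    unfold PySem.Dict.modify
    rw [PySem.Dict.getD_insert_self, pv_insert_insert]
    simp [h]

-- ---- the preprocessing pass, componentwise ----

def pvAnn (pkgs : List String) (e : String × String) : String × String × String × Bool × Bool :=
  (e.1, e.2, pvCls e.1, pvLife e.1, pvTP pkgs (pvCls e.2))

theorem pvB_pre_fst (cg : List (String × String)) (pkgs : List String) :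
    (pvB_pre cg pkgs).1 = cg.map (pvAnn pkgs) := by
  unfold pvB_pre
  suffices h : ∀ (l : List (String × String)) (acc : List (String × String × String × Bool × Bool))
      (d : PySem.Dict String (List String)),
      (l.foldl (fun s e =>
        (s.1 ++ [(e.1, e.2, pvCls e.1, pvLife e.1, pvTP pkgs (pvCls e.2))],
         if pvLife e.1 then (s.2.setdefault e.2 []).modify e.2 [] (fun l => l ++ [pvCls e.1]) else s.2))
        (acc, d)).1 = acc ++ l.map (pvAnn pkgs) by
    simpa using h cg [] (PySem.Dict.mk [])
  intro l
  induction l with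
  | nil => intro acc d; simp
  | cons e t ih => intro acc d; simp [List.foldl_cons, ih, pvAnn]

theorem pv_bump_getD (d : PySem.Dict String (List String)) (v c m : String) :
    ((d.setdefault v []).modify v [] (fun l => l ++ [c])).getD m [] =
      if m = v then d.getD v [] ++ [c] else d.getD m [] := by
  unfold PySem.Dict.modify
  by_cases hm : m = v
  · subst hm
    rw [if_pos rfl, PySem.Dict.getD_insert_self, PySem.Dict.getD_setdefault_self]
  · rw [if_neg hm, PySem.Dict.getD_eq_get?_getD, PySem.Dict.get?_insert, if_neg hm,
      PySem.Dict.get?_setdefault_of_ne d _ hm, ← PySem.Dict.getD_eq_get?_getD]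

theorem pvB_pre_snd_getD (cg : List (String × String)) (pkgs : List String) (m : String) :
    (pvB_pre cg pkgs).2.getD m [] =
      (cg.filter (fun e => e.2 == m && pvLife e.1)).map (fun e => pvCls e.1) := by
  unfold pvB_pre
  suffices h : ∀ (l : List (String × String)) (acc : List (String × String × String × Bool × Bool))
      (d : PySem.Dict String (List String)),
      (l.foldl (fun s e =>
        (s.1 ++ [(e.1, e.2, pvCls e.1, pvLife e.1, pvTP pkgs (pvCls e.2))],
         if pvLife e.1 then (s.2.setdefault e.2 []).modify e.2 [] (fun l => l ++ [pvCls e.1]) else s.2))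
        (acc, d)).2.getD m [] =
      d.getD m [] ++ (l.filter (fun e => e.2 == m && pvLife e.1)).map (fun e => pvCls e.1) by
    have h0 : (PySem.Dict.mk ([] : List (String × List String))).getD m [] = [] := rfl
    simpa [h0] using h cg [] (PySem.Dict.mk [])
  intro l
  induction l with
  | nil => intro acc d; simp
  | cons e t ih =>
    intro acc d
    simp only [List.foldl_cons]
    rw [ih]
    cases hl : pvLife e.1 with
    | false => simp [hl, List.filter_cons]
    | true =>
      rw [if_pos rfl, pv_bump_getD]
      by_cases hm : m = e.2
      · subst hm
        rw [if_pos rfl]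
        simp [hl, List.filter_cons, List.append_assoc]
      · have hbm : (e.2 == m) = false := by simpa using Ne.symm hm
        rw [if_neg hm]
        simp [hl, hbm, List.filter_cons]

-- ---- seed phases agree ----

theorem pvB_seedR_eq (cg : List (String × String)) (pkgs : List String) :
    pvB_seedR (cg.map (pvAnn pkgs)) = pvA_seedR cg pkgs := by
  unfold pvB_seedR pvA_seedR
  rw [List.foldl_map]
  rfl

theorem pvB_seedDQ_eq (cg : List (String × String)) (pkgs : List String) (R : PySem.Set String) :
    pvB_seedDQ (cg.map (pvAnn pkgs)) R = pvA_seedDQ cg pkgs R := by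
  unfold pvB_seedDQ pvA_seedDQ
  rw [List.foldl_map]
  congr 1
  funext s e
  simp [pvAnn, pv_addMethod_eq]

-- ---- while-loop passes agree ----

theorem pvA_markR_eq (cg : List (String × String)) (pkgs : List String) (m : String)
    (R : PySem.Set String) :
    ((pvB_pre cg pkgs).2.getD m []).foldl PySem.Set.add R = pvA_markR cg m R := by
  rw [pvB_pre_snd_getD, List.foldl_map]
  unfold pvA_markR
  rw [PySem.List.foldl_if_eq_foldl_filter (fun e => e.2 == m && pvLife e.1)
    (fun R (e : String × String) => PySem.Set.add R (pvCls e.1)) cg R]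

theorem pvA_propagate_eq (cg : List (String × String)) (pkgs : List String) (m : String)
    (R ex : PySem.Set String) (d : PySem.Dict String (PySem.Set String)) (q : List String) :
    ((cg.map (pvAnn pkgs)).foldl (fun s e =>
        if e.2.1 == m || PySem.Set.contains R e.2.2.1 then
          (pvB_addMethod s.1 e.2.2.1 e.1,
           if !(PySem.Set.contains ex e.1) && !(s.2.contains e.1) then s.2 ++ [e.1] else s.2)
        else s)
      (d, q)) = pvA_propagate cg m R ex d q := by
  unfold pvA_propagate
  rw [List.foldl_map]
  congr 1
  funext s e
  simp [pvAnn, pv_addMethod_eq]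

theorem pv_loop_eq (cg : List (String × String)) (pkgs : List String) :
    ∀ (fuel : Nat) (R ex : PySem.Set String) (d : PySem.Dict String (PySem.Set String))
      (q : List String),
      pvB_loop (cg.map (pvAnn pkgs)) (pvB_pre cg pkgs).2 fuel R ex d q = pvA_loop cg fuel R ex d q := by
  intro fuel
  induction fuel with
  | zero => intro R ex d q; rfl
  | succ n ih =>
    intro R ex d q
    cases q with
    | nil => rfl
    | cons m rest =>
      simp only [pvB_loop, pvA_loop]
      rw [pvA_markR_eq, pvA_propagate_eq, ih]

-- B's result is exactly A's pre-final-loop state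
theorem pv_alt_eq (cg : List (String × String)) (pkgs : List String) (cpm : List (String × String)) :
    identify_third_party_dependencies_alt cg pkgs cpm =
      ((pvA_loop cg (2 * cg.length + (pvA_seedDQ cg pkgs (pvA_seedR cg pkgs)).2.length + 1)
          (pvA_seedR cg pkgs) PySem.Set.empty
          (pvA_seedDQ cg pkgs (pvA_seedR cg pkgs)).1 (pvA_seedDQ cg pkgs (pvA_seedR cg pkgs)).2).1,
       (pvA_loop cg (2 * cg.length + (pvA_seedDQ cg pkgs (pvA_seedR cg pkgs)).2.length + 1)
          (pvA_seedR cg pkgs) PySem.Set.empty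
          (pvA_seedDQ cg pkgs (pvA_seedR cg pkgs)).1 (pvA_seedDQ cg pkgs (pvA_seedR cg pkgs)).2).2.items) := by
  simp only [identify_third_party_dependencies_alt]
  rw [pvB_pre_fst, pvB_seedR_eq, pvB_seedDQ_eq, List.length_map, pv_loop_eq]

-- ---- no-op facts about A's final loop ----

def pvNoLife (d : PySem.Dict String (PySem.Set String)) : Prop :=
  ∀ p ∈ d.items, ∀ x ∈ p.2, pvLife x = false

def pvCallers (cg : List (String × String)) : List String := cg.map Prod.fst

theorem pv_final_inner_const (lastCls : String) (l : List String) (R : PySem.Set String)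
    (h : (∀ x ∈ l, pvLife x = false) ∨ PySem.Set.contains R lastCls = true) :
    l.foldl (fun R mm => if pvLife mm then PySem.Set.add R lastCls else R) R = R := by
  induction l with
  | nil => rfl
  | cons x t ih =>
    cases h with
    | inl h =>
      have hx : pvLife x = false := h x (List.mem_cons_self)
      simp only [List.foldl_cons, hx, Bool.false_eq_true, if_false]
      exact ih (Or.inl fun y hy => h y (List.mem_cons_of_mem x hy))
    | inr h =>
      have hadd : PySem.Set.add R lastCls = R := by unfold PySem.Set.add; rw [if_pos h]
      have hstep : (if pvLife x = true then PySem.Set.add R lastCls else R) = R := by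
        split <;> [exact hadd; rfl]
      simp only [List.foldl_cons, hstep]
      exact ih (Or.inr h)

theorem pv_final_noop_nolife (lastCls : String) (d : PySem.Dict String (PySem.Set String))
    (R : PySem.Set String) (hd : pvNoLife d) : pvA_final lastCls d R = R := by
  unfold pvA_final
  have key : ∀ (l : List (String × PySem.Set String)) (R : PySem.Set String),
      (∀ p ∈ l, ∀ x ∈ p.2, pvLife x = false) →
      l.foldl (fun R p =>
        p.2.foldl (fun R mm => if pvLife mm then PySem.Set.add R lastCls else R) R) R = R := by
    intro l
    induction l with
    | nil => intro R _; rfl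
    | cons p t ih =>
      intro R h
      simp only [List.foldl_cons]
      rw [pv_final_inner_const lastCls p.2 R (Or.inl (h p (List.mem_cons_self)))]
      exact ih R fun q hq => h q (List.mem_cons_of_mem p hq)
  exact key d.items R hd

theorem pv_final_noop_mem (lastCls : String) (d : PySem.Dict String (PySem.Set String))
    (R : PySem.Set String) (h : PySem.Set.contains R lastCls = true) : pvA_final lastCls d R = R := by
  unfold pvA_final
  have key : ∀ (l : List (String × PySem.Set String)) (R : PySem.Set String),
      PySem.Set.contains R lastCls = true →
      l.foldl (fun R p =>
        p.2.foldl (fun R mm => if pvLife mm then PySem.Set.add R lastCls else R) R) R = R := by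
    intro l
    induction l with
    | nil => intro R _; rfl
    | cons p t ih =>
      intro R h
      simp only [List.foldl_cons]
      rw [pv_final_inner_const lastCls p.2 R (Or.inr h)]
      exact ih R h
  exact key d.items R h

-- ---- case "no third-party edge": nothing is ever seeded ----

theorem pv_seedR_empty (cg : List (String × String)) (pkgs : List String)
    (h : ∀ e ∈ cg, (pvTP pkgs (pvCls e.2) && pvLife e.1) = false) :
    pvA_seedR cg pkgs = PySem.Set.empty := by
  unfold pvA_seedR
  have key : ∀ (l : List (String × String)) (R : PySem.Set String),
      (∀ e ∈ l, (pvTP pkgs (pvCls e.2) && pvLife e.1) = false) →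
      l.foldl (fun R e =>
        if pvTP pkgs (pvCls e.2) && pvLife e.1 then PySem.Set.add R (pvCls e.1) else R) R = R := by
    intro l
    induction l with
    | nil => intro R _; rfl
    | cons e t ih =>
      intro R hl
      simp only [List.foldl_cons, hl e (List.mem_cons_self), Bool.false_eq_true, if_false]
      exact ih R fun e' he' => hl e' (List.mem_cons_of_mem e he')
  exact key cg PySem.Set.empty h

theorem pv_contains_empty (x : String) :
    PySem.Set.contains (PySem.Set.empty : PySem.Set String) x = false := rfl

theorem pv_seedDQ_nil (cg : List (String × String)) (pkgs : List String)
    (h : ∀ e ∈ cg, pvTP pkgs (pvCls e.2) = false) :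
    pvA_seedDQ cg pkgs PySem.Set.empty = (PySem.Dict.mk [], []) := by
  unfold pvA_seedDQ
  have key : ∀ (l : List (String × String)) (s : PySem.Dict String (PySem.Set String) × List String),
      (∀ e ∈ l, pvTP pkgs (pvCls e.2) = false) →
      l.foldl (fun s e =>
        if pvTP pkgs (pvCls e.2) || PySem.Set.contains PySem.Set.empty (pvCls e.1) then
          (pvA_addMethod s.1 (pvCls e.1) e.1, s.2 ++ [e.1]) else s) s = s := by
    intro l
    induction l with
    | nil => intro s _; rfl
    | cons e t ih =>
      intro s hl
      simp only [List.foldl_cons, hl e (List.mem_cons_self), pv_contains_empty,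
        Bool.or_self, Bool.false_eq_true, if_false]
      exact ih s fun e' he' => hl e' (List.mem_cons_of_mem e he')
  exact key cg _ h

theorem pv_loop_nilq (cg : List (String × String)) (k : Nat) (R ex : PySem.Set String)
    (d : PySem.Dict String (PySem.Set String)) : pvA_loop cg (k + 1) R ex d [] = (R, d) := rfl

-- ---- case "no wired lifecycle caller": the dict never holds a lifecycle method ----

theorem pv_mem_getD (d : PySem.Dict String (PySem.Set String)) (c x : String)
    (hx : x ∈ d.getD c PySem.Set.empty) : ∃ q ∈ d.items, x ∈ q.2 := by
  rw [PySem.Dict.getD_eq_get?_getD] at hx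
  cases hq : d.get? c with
  | none => rw [hq] at hx; cases hx
  | some s =>
    rw [hq] at hx
    exact ⟨(c, s), PySem.Dict.mem_items_of_get?_eq_some d hq, hx⟩

theorem pv_addMethod_mem (d : PySem.Dict String (PySem.Set String)) (c u : String)
    (p : String × PySem.Set String) (hp : p ∈ (pvA_addMethod d c u).items) (x : String)
    (hx : x ∈ p.2) : x = u ∨ ∃ q ∈ d.items, x ∈ q.2 := by
  unfold pvA_addMethod at hp
  cases h : d.contains c with
  | true =>
    rw [h] at hp
    simp only [if_pos, PySem.Dict.modify, PySem.Dict.items_insert, PySem.Dict.getD_eq_get?_getD] at hp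
    rw [if_pos (by simpa using h)] at hp
    rcases List.mem_map.1 hp with ⟨q, hq, hque⟩
    by_cases hqc : (q.1 == c) = true
    · rw [if_pos hqc] at hque
      subst hque
      simp only at hx
      rcases (PySem.Set.mem_add _ _ _).1 hx with hxs | hxu
      · rcases pv_mem_getD d c x (by rw [PySem.Dict.getD_eq_get?_getD]; exact hxs) with ⟨r, hr, hxr⟩
        exact Or.inr ⟨r, hr, hxr⟩
      · exact Or.inl hxu
    · rw [if_neg hqc] at hque
      subst hque
      exact Or.inr ⟨q, hq, hx⟩
  | false =>
    rw [h] at hp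
    simp only [Bool.false_eq_true, if_false, PySem.Dict.items_insert, h] at hp
    rcases List.mem_append.1 hp with hold | hnew
    · exact Or.inr ⟨p, hold, hx⟩
    · rcases List.mem_singleton.1 hnew with rfl
      rcases (PySem.Set.mem_add _ _ _).1
          (show x ∈ PySem.Set.add PySem.Set.empty u from hx) with hxs | hxu
      · cases hxs
      · exact Or.inl hxu

theorem pv_addMethod_nolife (d : PySem.Dict String (PySem.Set String)) (c u : String)
    (hd : pvNoLife d) (hu : pvLife u = false) : pvNoLife (pvA_addMethod d c u) := by
  intro p hp x hx
  rcases pv_addMethod_mem d c u p hp x hx with rfl | ⟨q, hq, hxq⟩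
  · exact hu
  · exact hd q hq x hxq

theorem pv_propagate_inv (cg : List (String × String)) (m : String) (ex : PySem.Set String)
    (hlife : ∀ e ∈ cg, e.2 = m → pvLife e.1 = false) :
    ∀ (l : List (String × String)), (∀ e ∈ l, e ∈ cg) →
    ∀ (d : PySem.Dict String (PySem.Set String)) (q : List String), pvNoLife d →
      (∀ u ∈ q, u ∈ pvCallers cg) →
      pvNoLife (l.foldl (fun s e =>
        if e.2 == m || PySem.Set.contains PySem.Set.empty (pvCls e.1) then
          (pvA_addMethod s.1 (pvCls e.1) e.1,
           if !(PySem.Set.contains ex e.1) && !(s.2.contains e.1) then s.2 ++ [e.1] else s.2)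
        else s) (d, q)).1 ∧
      (∀ u ∈ (l.foldl (fun s e =>
        if e.2 == m || PySem.Set.contains PySem.Set.empty (pvCls e.1) then
          (pvA_addMethod s.1 (pvCls e.1) e.1,
           if !(PySem.Set.contains ex e.1) && !(s.2.contains e.1) then s.2 ++ [e.1] else s.2)
        else s) (d, q)).2, u ∈ pvCallers cg) := by
  intro l
  induction l with
  | nil => intro _ d q hd hq; exact ⟨hd, hq⟩
  | cons e t ih =>
    intro hsub d q hd hq
    simp only [List.foldl_cons]
    have hcond : (e.2 == m || PySem.Set.contains PySem.Set.empty (pvCls e.1)) = (e.2 == m) := by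
      rw [pv_contains_empty, Bool.or_false]
    rw [hcond]
    cases hbe : (e.2 == m) with
    | false =>
      simp only [Bool.false_eq_true, if_false]
      exact ih (fun e' he' => hsub e' (List.mem_cons_of_mem e he')) d q hd hq
    | true =>
      have hem : e.2 = m := by simpa using hbe
      have hle : pvLife e.1 = false := hlife e (hsub e (List.mem_cons_self)) hem
      have hcall : e.1 ∈ pvCallers cg :=
        List.mem_map.2 ⟨e, hsub e (List.mem_cons_self), rfl⟩
      rw [if_pos (rfl : (true : Bool) = true)]
      refine ih (fun e' he' => hsub e' (List.mem_cons_of_mem e he')) _ _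
        (pv_addMethod_nolife d (pvCls e.1) e.1 hd hle) ?_
      intro u hu
      by_cases hc : (!(PySem.Set.contains ex e.1) && !(q.contains e.1)) = true
      · rw [if_pos hc] at hu
        rcases List.mem_append.1 hu with h | h
        · exact hq u h
        · rcases List.mem_singleton.1 h with rfl; exact hcall
      · rw [if_neg hc] at hu
        exact hq u hu

theorem pv_markR_noop (cg : List (String × String)) (m : String) (R : PySem.Set String)
    (h : ∀ e ∈ cg, (e.2 == m && pvLife e.1) = false) : pvA_markR cg m R = R := by
  unfold pvA_markR
  have key : ∀ (l : List (String × String)) (R : PySem.Set String),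
      (∀ e ∈ l, (e.2 == m && pvLife e.1) = false) →
      l.foldl (fun R e => if e.2 == m && pvLife e.1 then PySem.Set.add R (pvCls e.1) else R) R = R := by
    intro l
    induction l with
    | nil => intro R _; rfl
    | cons e t ih =>
      intro R hl
      simp only [List.foldl_cons, hl e (List.mem_cons_self), Bool.false_eq_true, if_false]
      exact ih R fun e' he' => hl e' (List.mem_cons_of_mem e he')
  exact key cg R h

theorem pv_contains_mem (cg : List (String × String)) (m : String) (hm : m ∈ pvCallers cg) :
    (pvCallers cg).contains m = true := by
  exact List.elem_eq_true_of_mem hm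

theorem pv_loop_nolife (cg : List (String × String)) (pkgs : List String)
    (hW : ∀ e ∈ cg,
      (pvLife e.1 && (pvTP pkgs (pvCls e.2) || (pvCallers cg).contains e.2)) = false) :
    ∀ (fuel : Nat) (ex : PySem.Set String) (d : PySem.Dict String (PySem.Set String))
      (q : List String), pvNoLife d → (∀ u ∈ q, u ∈ pvCallers cg) →
      pvNoLife (pvA_loop cg fuel PySem.Set.empty ex d q).2 := by
  intro fuel
  induction fuel with
  | zero => intro ex d q hd _; exact hd
  | succ n ih =>
    intro ex d q hd hq
    cases q with
    | nil => exact hd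
    | cons m rest =>
      have hm : m ∈ pvCallers cg := hq m (List.mem_cons_self)
      have hlife : ∀ e ∈ cg, e.2 = m → pvLife e.1 = false := by
        intro e he hem
        have := hW e he
        rw [hem, pv_contains_mem cg m hm, Bool.or_true, Bool.and_true] at this
        exact this
      have hmark : pvA_markR cg m PySem.Set.empty = PySem.Set.empty := by
        apply pv_markR_noop
        intro e he
        cases hbe : (e.2 == m) with
        | false => simp [hbe]
        | true => simp [hbe, hlife e he (by simpa using hbe)]
      simp only [pvA_loop, hmark]
      unfold pvA_propagate
      have hprop := pv_propagate_inv cg m (PySem.Set.add ex m) hlife cg (fun e he => he) d rest hd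
        (fun u hu => hq u (List.mem_cons_of_mem m hu))
      exact ih _ _ _ hprop.1 hprop.2

theorem pv_seedDQ_inv (cg : List (String × String)) (pkgs : List String)
    (hW : ∀ e ∈ cg,
      (pvLife e.1 && (pvTP pkgs (pvCls e.2) || (pvCallers cg).contains e.2)) = false) :
    pvNoLife (pvA_seedDQ cg pkgs PySem.Set.empty).1 ∧
      (∀ u ∈ (pvA_seedDQ cg pkgs PySem.Set.empty).2, u ∈ pvCallers cg) := by
  unfold pvA_seedDQ
  have key : ∀ (l : List (String × String)), (∀ e ∈ l, e ∈ cg) →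
      ∀ (d : PySem.Dict String (PySem.Set String)) (q : List String), pvNoLife d →
      (∀ u ∈ q, u ∈ pvCallers cg) →
      pvNoLife (l.foldl (fun s e =>
        if pvTP pkgs (pvCls e.2) || PySem.Set.contains PySem.Set.empty (pvCls e.1) then
          (pvA_addMethod s.1 (pvCls e.1) e.1, s.2 ++ [e.1]) else s) (d, q)).1 ∧
      (∀ u ∈ (l.foldl (fun s e =>
        if pvTP pkgs (pvCls e.2) || PySem.Set.contains PySem.Set.empty (pvCls e.1) then
          (pvA_addMethod s.1 (pvCls e.1) e.1, s.2 ++ [e.1]) else s) (d, q)).2, u ∈ pvCallers cg) := by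
    intro l
    induction l with
    | nil => intro _ d q hd hq; exact ⟨hd, hq⟩
    | cons e t ih =>
      intro hsub d q hd hq
      simp only [List.foldl_cons]
      have hcond : (pvTP pkgs (pvCls e.2) || PySem.Set.contains PySem.Set.empty (pvCls e.1)) =
          pvTP pkgs (pvCls e.2) := by
        rw [pv_contains_empty, Bool.or_false]
      rw [hcond]
      cases htp : pvTP pkgs (pvCls e.2) with
      | false =>
        simp only [Bool.false_eq_true, if_false]
        exact ih (fun e' he' => hsub e' (List.mem_cons_of_mem e he')) d q hd hq
      | true =>
        have hle : pvLife e.1 = false := by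
          have := hW e (hsub e (List.mem_cons_self))
          rw [htp, Bool.true_or, Bool.and_true] at this
          exact this
        have hcall : e.1 ∈ pvCallers cg :=
          List.mem_map.2 ⟨e, hsub e (List.mem_cons_self), rfl⟩
        rw [if_pos (rfl : (true : Bool) = true)]
        refine ih (fun e' he' => hsub e' (List.mem_cons_of_mem e he')) _ _
          (pv_addMethod_nolife d (pvCls e.1) e.1 hd hle) ?_
        intro u hu
        rcases List.mem_append.1 hu with h | h
        · exact hq u h
        · rcases List.mem_singleton.1 h with rfl; exact hcall
  exact key cg (fun e he => he) (PySem.Dict.mk []) [] (by intro p hp; cases hp) (by intro u hu; cases hu)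

-- ---- case "the last caller class is a direct seed": the added class is already there ----

theorem pv_contains_add (s : PySem.Set String) (y x : String)
    (h : PySem.Set.contains s x = true) :
    PySem.Set.contains (PySem.Set.add s y) x = true := by
  unfold PySem.Set.add
  split
  · exact h
  · exact (PySem.Set.contains_iff _ _).2 (List.mem_append_left _ ((PySem.Set.contains_iff _ _).1 h))

theorem pv_contains_add_self (s : PySem.Set String) (x : String) :
    PySem.Set.contains (PySem.Set.add s x) x = true := by
  unfold PySem.Set.add
  split
  · assumption
  · exact (PySem.Set.contains_iff _ _).2 (List.mem_append_right _ (List.mem_singleton.2 rfl))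

theorem pv_seedR_contains (cg : List (String × String)) (pkgs : List String)
    (e : String × String) (he : e ∈ cg) (hc : (pvTP pkgs (pvCls e.2) && pvLife e.1) = true) :
    PySem.Set.contains (pvA_seedR cg pkgs) (pvCls e.1) = true := by
  unfold pvA_seedR
  have key : ∀ (l : List (String × String)) (R : PySem.Set String),
      (e ∈ l ∨ PySem.Set.contains R (pvCls e.1) = true) →
      PySem.Set.contains
        (l.foldl (fun R f =>
          if pvTP pkgs (pvCls f.2) && pvLife f.1 then PySem.Set.add R (pvCls f.1) else R) R)
        (pvCls e.1) = true := by
    intro l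
    induction l with
    | nil =>
      intro R h
      rcases h with h | h
      · cases h
      · exact h
    | cons f t ih =>
      intro R h
      simp only [List.foldl_cons]
      rcases h with h | h
      · rcases List.mem_cons.1 h with rfl | hmem
        · rw [if_pos hc]
          exact ih _ (Or.inr (pv_contains_add_self R (pvCls e.1)))
        · exact ih _ (Or.inl hmem)
      · refine ih _ (Or.inr ?_)
        split
        · exact pv_contains_add R _ _ h
        · exact h
  exact key cg PySem.Set.empty (Or.inl he)

theorem pv_markR_mono (cg : List (String × String)) (m : String) (R : PySem.Set String)
    (x : String) (h : PySem.Set.contains R x = true) :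
    PySem.Set.contains (pvA_markR cg m R) x = true := by
  unfold pvA_markR
  have key : ∀ (l : List (String × String)) (R : PySem.Set String),
      PySem.Set.contains R x = true →
      PySem.Set.contains
        (l.foldl (fun R e => if e.2 == m && pvLife e.1 then PySem.Set.add R (pvCls e.1) else R) R)
        x = true := by
    intro l
    induction l with
    | nil => intro R h; exact h
    | cons e t ih =>
      intro R h
      simp only [List.foldl_cons]
      refine ih _ ?_
      split
      · exact pv_contains_add R _ _ h
      · exact h
  exact key cg R h

theorem pv_loop_R_mono (cg : List (String × String)) (x : String) :
    ∀ (fuel : Nat) (R ex : PySem.Set String) (d : PySem.Dict String (PySem.Set String))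
      (q : List String), PySem.Set.contains R x = true →
      PySem.Set.contains (pvA_loop cg fuel R ex d q).1 x = true := by
  intro fuel
  induction fuel with
  | zero => intro R ex d q h; exact h
  | succ n ih =>
    intro R ex d q h
    cases q with
    | nil => exact h
    | cons m rest =>
      simp only [pvA_loop]
      exact ih _ _ _ _ (pv_markR_mono cg m R x h)

-- ===== VERDICT (by name: the statement is the Claim_ definition above) =====
theorem identify_third_party_dependencies_spec : Claim_unchanged_identify_third_party_dependencies := by
  intro cg pkgs cpm _hdom hnd
  rw [pv_alt_eq]
  show identify_third_party_dependencies cg pkgs cpm = _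
  simp only [identify_third_party_dependencies]
  rw [Prod.mk.injEq]
  refine ⟨?_, rfl⟩
  by_cases h1 : cg.any (fun e => pvTP pkgs (pvCls e.2)) = true
  · by_cases h2 : cg.any (fun e => pvLife e.1 &&
        (pvTP pkgs (pvCls e.2) || (cg.map Prod.fst).contains e.2)) = true
    · by_cases h3 : cg.all (fun e => !(pvLife e.1 && pvTP pkgs (pvCls e.2) &&
          (pvCls e.1 == pvLastCls cg))) = true
      · exact absurd ⟨h1, h2, h3⟩ hnd
      · -- the last caller's class is itself a direct seed: the final loop re-adds a present element
        have h3' : cg.all (fun e => !(pvLife e.1 && pvTP pkgs (pvCls e.2) &&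
            (pvCls e.1 == pvLastCls cg))) = false := by
          revert h3
          cases cg.all (fun e => !(pvLife e.1 && pvTP pkgs (pvCls e.2) && (pvCls e.1 == pvLastCls cg))) <;> simp
        have hx : ∃ e ∈ cg,
            (pvLife e.1 && pvTP pkgs (pvCls e.2) && (pvCls e.1 == pvLastCls cg)) = true := by
          rcases List.all_eq_false.1 h3' with ⟨e, he, hne⟩
          refine ⟨e, he, ?_⟩
          revert hne
          cases pvLife e.1 && pvTP pkgs (pvCls e.2) && (pvCls e.1 == pvLastCls cg) <;> simp
        rcases hx with ⟨e, he, hcond⟩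
        have hlp : pvLife e.1 = true := by
          revert hcond; cases pvLife e.1 <;> simp
        have htp : pvTP pkgs (pvCls e.2) = true := by
          revert hcond; cases pvTP pkgs (pvCls e.2) <;> simp
        have hcl : pvCls e.1 = pvLastCls cg := by
          have : (pvCls e.1 == pvLastCls cg) = true := by
            revert hcond; cases pvCls e.1 == pvLastCls cg <;> simp
          simpa using this
        have hseed : PySem.Set.contains (pvA_seedR cg pkgs) (pvCls e.1) = true :=
          pv_seedR_contains cg pkgs e he (by rw [htp, hlp]; rfl)
        rw [hcl] at hseed
        exact pv_final_noop_mem _ _ _ (pv_loop_R_mono cg (pvLastCls cg) _ _ _ _ _ hseed)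
    · -- no lifecycle caller is wired to a third-party or in-graph callee: the dict never
      -- holds a lifecycle method, so the final loop adds nothing
      have h2' : cg.any (fun e => pvLife e.1 &&
          (pvTP pkgs (pvCls e.2) || (cg.map Prod.fst).contains e.2)) = false := by
        revert h2
        cases cg.any (fun e => pvLife e.1 && (pvTP pkgs (pvCls e.2) || (cg.map Prod.fst).contains e.2)) <;> simp
      have hW : ∀ e ∈ cg,
          (pvLife e.1 && (pvTP pkgs (pvCls e.2) || (pvCallers cg).contains e.2)) = false := by
        intro e he
        have := List.any_eq_false.1 h2' e he
        simpa [pvCallers] using this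
      have hseedR : pvA_seedR cg pkgs = PySem.Set.empty := by
        apply pv_seedR_empty
        intro e he
        cases hl : pvLife e.1 with
        | false => simp [hl]
        | true =>
          have hw := hW e he
          rw [hl, Bool.true_and] at hw
          have htp0 : pvTP pkgs (pvCls e.2) = false := by
            revert hw; cases pvTP pkgs (pvCls e.2) <;> simp
          simp [htp0]
      rw [hseedR]
      have hseed := pv_seedDQ_inv cg pkgs hW
      exact pv_final_noop_nolife _ _ _
        (pv_loop_nolife cg pkgs hW _ _ _ _ hseed.1 hseed.2)
  · -- no edge calls a third-party class: nothing is ever seeded, the dict stays empty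
    have h1' : cg.any (fun e => pvTP pkgs (pvCls e.2)) = false := by
      revert h1
      cases cg.any (fun e => pvTP pkgs (pvCls e.2)) <;> simp
    have htp : ∀ e ∈ cg, pvTP pkgs (pvCls e.2) = false := by
      intro e he
      simpa using List.any_eq_false.1 h1' e he
    have hseedR : pvA_seedR cg pkgs = PySem.Set.empty := by
      apply pv_seedR_empty
      intro e he
      rw [htp e he, Bool.false_and]
    rw [hseedR, pv_seedDQ_nil cg pkgs htp, pv_loop_nilq]
    rfl

theorem identify_third_party_dependencies_changed : Claim_changed_identify_third_party_dependencies := by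
  unfold Claim_changed_identify_third_party_dependencies; decide
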